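-- pv_equiv track=rewrite | github.com/truhanen/advent_of_code_2024 | day01.py | solve
-- ===== SOURCE A (Python) =====
-- from collections import Counter
--
-- def solve(values1: list[int], values2: list[int]) -> tuple[int, int]:
--     distance_sum = sum(
--         abs(value1 - value2) for value1, value2 in zip(sorted(values1), sorted(values2))
--     )
--
--     counts2 = Counter(values2)
--     similarity_score = sum(
--         value1 * counts2[value1] if value1 in counts2 else 0 for value1 in values1
--     )
--
--     return distance_sum, similarity_score
-- ===== SOURCE B (Python) =====
-- def solve(values1: list[int], values2: list[int]) -> tuple[int, int]:
--     s1 = sorted(values1)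
--     s2 = sorted(values2)
--
--     distance_sum = 0
--     for a, b in zip(s1, s2):
--         distance_sum += abs(a - b)
--
--     # similarity score by a two-pointer merge over the two sorted lists:
--     # for each shared value, count its runs in both lists and add v*c1*c2.
--     similarity_score = 0
--     i = j = 0
--     n1, n2 = len(s1), len(s2)
--     while i < n1 and j < n2:
--         if s1[i] < s2[j]:
--             i += 1
--         elif s2[j] < s1[i]:
--             j += 1
--         else:
--             v = s1[i]
--             c1 = 0
--             while i < n1 and s1[i] == v:
--                 i += 1
--                 c1 += 1
--             c2 = 0
--             while j < n2 and s2[j] == v: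
--                 j += 1
--                 c2 += 1
--             similarity_score += v * c1 * c2
--
--     return distance_sum, similarity_score
-- ===== Notes on version B (the rewrite author's own statement) =====
-- stated objective: alternative
-- what changed: The Counter hash table is removed: the similarity score is computed by a two-pointer merge over the two already-sorted lists, counting equal runs on both sides and adding value*c1*c2 per shared value; the distance sum is accumulated in the same pass style.
import Mathlib
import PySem

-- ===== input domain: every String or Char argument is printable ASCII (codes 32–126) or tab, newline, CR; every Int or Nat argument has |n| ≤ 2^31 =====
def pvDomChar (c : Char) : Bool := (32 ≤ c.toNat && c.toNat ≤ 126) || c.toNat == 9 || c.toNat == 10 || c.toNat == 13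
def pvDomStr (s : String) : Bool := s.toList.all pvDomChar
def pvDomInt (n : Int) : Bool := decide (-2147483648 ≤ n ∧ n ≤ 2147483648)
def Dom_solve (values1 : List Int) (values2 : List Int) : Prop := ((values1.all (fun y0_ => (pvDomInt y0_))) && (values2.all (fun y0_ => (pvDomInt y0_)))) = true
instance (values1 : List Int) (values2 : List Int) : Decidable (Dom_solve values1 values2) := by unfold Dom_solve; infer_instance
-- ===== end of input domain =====

-- B replaces A's Counter hash table by a two-pointer run-counting merge over the two sorted lists (alternative decomposition, same asymptotic cost).

-- ===== PORT A =====
def solve (values1 : List Int) (values2 : List Int) : Int × Int :=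
  let s1 := PySem.List.sorted values1 (fun x => x) false
  let s2 := PySem.List.sorted values2 (fun x => x) false
  let distance_sum := ((s1.zip s2).map (fun p => |p.1 - p.2|)).sum
  let counts2 := PySem.Dict.counter values2
  let similarity_score :=
    (values1.map (fun v => if counts2.contains v then v * counts2.getD v 0 else 0)).sum
  (distance_sum, similarity_score)

-- ===== PORT B =====
-- the two-pointer merge loop of Source B: equal runs are consumed with takeWhile/dropWhile
def simMerge : List Int → List Int → Int
  | [], _ => 0
  | _ :: _, [] => 0
  | x :: xs, y :: ys =>
    if x < y then simMerge xs (y :: ys)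
    else if y < x then simMerge (x :: xs) ys
    else
      let c1 : Int := 1 + (xs.takeWhile (· == x)).length
      let c2 : Int := 1 + (ys.takeWhile (· == x)).length
      x * c1 * c2 + simMerge (xs.dropWhile (· == x)) (ys.dropWhile (· == x))
termination_by a b => a.length + b.length
decreasing_by
  · simp
  · simp
  · have h1 := List.length_dropWhile_le (p := (· == x)) (l := xs)
    have h2 := List.length_dropWhile_le (p := (· == x)) (l := ys)
    simp only [List.length_cons]; omega

def solve_alt (values1 : List Int) (values2 : List Int) : Int × Int :=
  let s1 := PySem.List.sorted values1 (fun x => x) false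
  let s2 := PySem.List.sorted values2 (fun x => x) false
  let distance_sum := (s1.zip s2).foldl (fun acc p => acc + |p.1 - p.2|) 0
  (distance_sum, simMerge s1 s2)

-- ===== PRECONDITION & SPEC =====
def Spec_solve (values1 : List Int) (values2 : List Int) (out : Int × Int) : Prop := out = solve_alt values1 values2
instance (values1 : List Int) (values2 : List Int) (out : Int × Int) : Decidable (Spec_solve values1 values2 out) := by unfold Spec_solve; infer_instance

-- ===== CLAIM (what is proved, stated in full; the proofs are below) =====
def Claim_equal_solve : Prop := ∀ (values1 : List Int) (values2 : List Int), Dom_solve values1 values2 → Spec_solve values1 values2 (solve values1 values2)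

-- ===== LEMMAS AND PROOFS =====

-- on a sorted list all of whose elements are ≥ x: the count of x is the length of
-- the leading run of x's, and everything past that run is strictly greater than x
theorem run_facts (x : Int) : ∀ (l : List Int), l.Pairwise (· ≤ ·) → (∀ z ∈ l, x ≤ z) →
    l.count x = (l.takeWhile (· == x)).length ∧ ∀ v ∈ l.dropWhile (· == x), x < v := by
  intro l
  induction l with
  | nil => simp
  | cons y ys ih =>
    intro hp hge
    rcases List.pairwise_cons.mp hp with ⟨hy, hp'⟩
    by_cases hxy : y = x
    · subst hxy
      have := ih hp' (fun z hz => hy z hz)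
      simp only [List.takeWhile_cons, List.dropWhile_cons, beq_self_eq_true, if_true,
        List.count_cons, List.length_cons]
      constructor
      · simp [this.1]
      · exact this.2
    · have hlt : x < y := lt_of_le_of_ne (hge y (List.mem_cons_self)) (fun h => hxy h.symm)
      have hbeq : (y == x) = false := by simp [hxy]
      have hnm : x ∉ ys := fun hm => by have := hy x hm; omega
      refine ⟨?_, ?_⟩
      · simp [hbeq, List.count_eq_zero_of_not_mem hnm, hxy]
      · simp only [List.dropWhile_cons, hbeq, Bool.false_eq_true, if_false]
        intro v hv
        rcases List.mem_cons.mp hv with rfl | hv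
        · exact hlt
        · exact lt_of_lt_of_le hlt (hy v hv)

theorem const_map_sum (x : Int) (f : Int → Int) : ∀ (l : List Int), (∀ v ∈ l, v = x) →
    (l.map f).sum = (l.length : Int) * f x := by
  intro l
  induction l with
  | nil => simp
  | cons a t ih =>
    intro h
    have ha : a = x := h a List.mem_cons_self
    have := ih (fun v hv => h v (List.mem_cons_of_mem _ hv))
    simp only [List.map_cons, List.sum_cons, this, ha, List.length_cons]
    push_cast
    ring

theorem simMerge_eq : ∀ (n : Nat) (s1 s2 : List Int), s1.length + s2.length ≤ n →
    s1.Pairwise (· ≤ ·) → s2.Pairwise (· ≤ ·) →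
    simMerge s1 s2 = (s1.map (fun v => v * (s2.count v : Int))).sum := by
  intro n
  induction n with
  | zero =>
    intro s1 s2 hlen _ _
    have : s1 = [] := by cases s1 <;> simp_all
    subst this; simp [simMerge]
  | succ n ih =>
    intro s1 s2 hlen h1 h2
    match s1, s2 with
    | [], _ => simp [simMerge]
    | x :: xs, [] => simp [simMerge]
    | x :: xs, y :: ys =>
      rcases List.pairwise_cons.mp h1 with ⟨hx, h1'⟩
      rcases List.pairwise_cons.mp h2 with ⟨hy, h2'⟩
      rw [simMerge]
      by_cases hlt : x < y
      · -- x smaller than everything in s2: its count there is 0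
        rw [if_pos hlt]
        have hnm : x ∉ y :: ys := by
          intro hm
          rcases List.mem_cons.mp hm with rfl | hm
          · omega
          · exact absurd (hy x hm) (by omega)
        have := ih xs (y :: ys) (by simp at hlen ⊢; omega) h1' h2
        rw [this, List.map_cons, List.sum_cons, List.count_eq_zero_of_not_mem hnm]
        simp
      · rw [if_neg hlt]
        by_cases hgt : y < x
        · -- y smaller than everything in s1: dropping it changes no counts
          rw [if_pos hgt]
          have := ih (x :: xs) ys (by simp at hlen ⊢; omega) h1 h2'
          rw [this]
          apply congrArg
          apply List.map_congr_left
          intro v hv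
          have hvy : v ≠ y := by
            rcases List.mem_cons.mp hv with rfl | hv
            · omega
            · have := hx v hv; omega
          simp [Ne.symm hvy]
        · -- x = y: peel the equal runs from both sides
          rw [if_neg hgt]
          have hxy : x = y := le_antisymm (by omega) (by omega)
          subst hxy
          have hr1 := run_facts x xs h1' (fun z hz => hx z hz)
          have hr2 := run_facts x ys h2' (fun z hz => hy z hz)
          set r1 := xs.takeWhile (· == x) with hr1def
          set r2 := ys.takeWhile (· == x) with hr2def
          set xs' := xs.dropWhile (· == x) with hxs'
          set ys' := ys.dropWhile (· == x) with hys'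
          have hxs_split : xs = r1 ++ xs' := (List.takeWhile_append_dropWhile).symm
          have hys_split : ys = r2 ++ ys' := (List.takeWhile_append_dropWhile).symm
          have h1'' : xs'.Pairwise (· ≤ ·) := h1'.sublist (List.dropWhile_sublist _)
          have h2'' : ys'.Pairwise (· ≤ ·) := h2'.sublist (List.dropWhile_sublist _)
          have hlen' : xs'.length + ys'.length ≤ n := by
            have a1 : xs'.length ≤ xs.length := List.length_dropWhile_le (p := (· == x)) (l := xs)
            have a2 : ys'.length ≤ ys.length := List.length_dropWhile_le (p := (· == x)) (l := ys)
            simp only [List.length_cons] at hlen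
            omega
          have hIH := ih xs' ys' hlen' h1'' h2''
          -- count of x in s2 = 1 + |r2|
          have hcx : ((x :: ys).count x : Int) = 1 + (r2.length : Int) := by
            rw [List.count_cons_self, hr2.1]
            push_cast; ring
          -- dropping the head x-run of s2 changes no count of an element of xs'
          have hcnt2 : ∀ v ∈ xs', ((x :: ys).count v : Int) = (ys'.count v : Int) := by
            intro v hv
            have hvx : x < v := hr1.2 v hv
            have hr2x : ∀ w ∈ r2, w = x := fun w hw => by
              have := List.mem_takeWhile_imp hw; simpa using this
            rw [List.count_cons, hys_split, List.count_append]
            have : r2.count v = 0 := by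
              apply List.count_eq_zero_of_not_mem
              intro hm; have := hr2x v hm; omega
            simp [this, show ¬ x = v by omega]
          have hsplit : x :: xs = (x :: r1) ++ xs' := by rw [hxs_split]; rfl
          rw [hsplit, List.map_append, List.sum_append]
          have hall : ∀ v ∈ x :: r1, v = x := by
            intro v hv
            rcases List.mem_cons.mp hv with rfl | hv
            · rfl
            · have := List.mem_takeWhile_imp hv; simpa using this
          rw [const_map_sum x _ (x :: r1) hall]
          rw [List.map_congr_left (fun v hv => by rw [hcnt2 v hv] :
              ∀ v ∈ xs', v * ((x :: ys).count v : Int) = v * (ys'.count v : Int))]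
          rw [← hIH, hcx]
          simp only [List.length_cons]
          push_cast
          ring

-- A's similarity term equals v * count(v, values2) pointwise
theorem a_sim_term (values2 : List Int) (v : Int) :
    (if (PySem.Dict.counter values2).contains v then v * (PySem.Dict.counter values2).getD v 0 else 0)
      = v * (values2.count v : Int) := by
  by_cases h : (PySem.Dict.counter values2).contains v = true
  · rw [if_pos h, PySem.Dict.getD_counter]
  · rw [if_neg (by simpa using h)]
    have : v ∉ values2 := by
      intro hm
      exact h (by simp [PySem.Dict.contains_counter, hm])
    simp [List.count_eq_zero_of_not_mem this]

-- ===== VERDICT (by name: the statement is the Claim_ definition above) =====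
theorem solve_spec : Claim_equal_solve := by
  intro values1 values2 _
  unfold Spec_solve solve solve_alt
  have hperm1 : (PySem.List.sorted values1 (fun x => x) false).Perm values1 :=
    PySem.List.sorted_perm values1 (fun x => x) false
  have hperm2 : (PySem.List.sorted values2 (fun x => x) false).Perm values2 :=
    PySem.List.sorted_perm values2 (fun x => x) false
  have hp1 : (PySem.List.sorted values1 (fun x => x) false).Pairwise (· ≤ ·) := by
    simpa using PySem.List.sorted_pairwise values1 (fun x => x)
  have hp2 : (PySem.List.sorted values2 (fun x => x) false).Pairwise (· ≤ ·) := by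
    simpa using PySem.List.sorted_pairwise values2 (fun x => x)
  refine Prod.ext ?_ ?_
  · -- distance sums: fold vs map-sum over the same zip
    simp [PySem.List.foldl_add]
  · -- similarity: merge over sorted lists vs Counter lookup
    simp only
    rw [simMerge_eq ((PySem.List.sorted values1 (fun x => x) false).length +
          (PySem.List.sorted values2 (fun x => x) false).length) _ _ le_rfl hp1 hp2]
    rw [List.map_congr_left (fun v _ => a_sim_term values2 v)]
    have hmapeq : (PySem.List.sorted values1 (fun x => x) false).map
        (fun v => v * ((PySem.List.sorted values2 (fun x => x) false).count v : Int))
        = (PySem.List.sorted values1 (fun x => x) false).map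
          (fun v => v * (values2.count v : Int)) := by
      apply List.map_congr_left
      intro v _
      rw [hperm2.count_eq]
    rw [hmapeq]
    exact ((hperm1.map (fun v => v * (values2.count v : Int))).sum_eq).symm
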